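-- pv_equiv track=rewrite | github.com/simulahmed2113/Lume | core/gcode_processor.py | _has_spindle_s
-- ===== SOURCE A (Python) =====
-- def _strip_inline_comment(line: str) -> str:
--     """Strip inline comments starting with ';'."""
--     return line.split(";", 1)[0]
--
-- def _is_full_line_comment(line: str) -> bool:
--     s = line.strip()
--     return s.startswith("(") and s.endswith(")")
--
-- def _has_spindle_s(line: str) -> bool:
--     """
--     Return True if line contains an S word used as G-code (not inside comments).
--     """
--     if _is_full_line_comment(line):
--         return False
--     code = _strip_inline_comment(line).strip()
--     if not code:
--         return False
--     for token in code.split():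
--         if token.startswith("S") and len(token) > 1:
--             # S followed by number or sign/decimal
--             ch = token[1]
--             if ch.isdigit() or ch in "+-.":
--                 return True
--     return False
-- ===== SOURCE B (Python) =====
-- def _strip_inline_comment(line: str) -> str:
--     return line.split(";", 1)[0]
--
-- def _is_full_line_comment(line: str) -> bool:
--     s = line.strip()
--     return s.startswith("(") and s.endswith(")")
--
-- def _has_spindle_s(line: str) -> bool:
--     """Single left-to-right character scan; no token list is built."""
--     if _is_full_line_comment(line):
--         return False
--     code = _strip_inline_comment(line).strip()
--     for i, c in enumerate(code):
--         if c == 'S' and (i == 0 or code[i - 1].isspace()):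
--             if i + 1 < len(code) and (code[i + 1].isdigit() or code[i + 1] in "+-."):
--                 return True
--     return False
-- ===== Notes on version B (the rewrite author's own statement) =====
-- stated objective: alternative
-- what changed: A tokenizes the cleaned line with code.split() and tests each token's first two characters; B makes a single character scan over the cleaned line, using the previous character (start-of-token test) and the next character (digit/sign/dot test), building no token list.
import Mathlib
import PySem

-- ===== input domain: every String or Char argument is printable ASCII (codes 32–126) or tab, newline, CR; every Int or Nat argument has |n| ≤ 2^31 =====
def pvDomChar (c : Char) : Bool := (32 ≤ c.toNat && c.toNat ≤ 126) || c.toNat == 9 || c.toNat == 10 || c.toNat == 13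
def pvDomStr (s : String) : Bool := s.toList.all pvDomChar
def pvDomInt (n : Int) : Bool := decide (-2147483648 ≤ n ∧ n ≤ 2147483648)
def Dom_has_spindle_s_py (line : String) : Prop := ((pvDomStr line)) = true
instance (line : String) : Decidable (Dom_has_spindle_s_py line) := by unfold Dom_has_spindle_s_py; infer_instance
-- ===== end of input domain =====

-- B replaces A's tokenization (code.split() + a per-token startswith/second-char test) with a
-- single character scan using the previous/next character; objective: alternative (no token list built).

-- ===== PORT A =====
-- module helpers _strip_inline_comment / _is_full_line_comment (shared by both ports, as in the module)
def strip_inline_comment_py (cs : List Char) : List Char :=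
  (PySem.Chars.splitOnMax cs [';'] 1).headD []   -- line.split(";", 1)[0]  (sep ≠ "", result never empty)

def is_full_line_comment_py (cs : List Char) : Bool :=
  let s := PySem.Chars.strip cs
  PySem.Chars.startswith s ['('] && PySem.Chars.endswith s [')']

-- the body of A's for-loop test on one token
def tok_has_s_py (t : List Char) : Bool :=
  if PySem.Chars.startswith t ['S'] && decide (1 < t.length) then
    match PySem.List.pyGet? t 1 with     -- ch = token[1]
    | some ch => PySem.Chars.isdigit ch || PySem.Chars.isIn [ch] ['+', '-', '.']
    | none => false
  else false

def has_spindle_s_py (line : String) : Bool :=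
  if is_full_line_comment_py line.toList then false
  else
    let code := PySem.Chars.strip (strip_inline_comment_py line.toList)
    if code.isEmpty then false
    else (PySem.Chars.split₀ code).any tok_has_s_py   -- for token in code.split(): … return True

-- ===== PORT B =====
-- for i, c in enumerate(code): prev char carried (i == 0 or code[i-1].isspace()), next char looked at
def scan_spindle (prev : Option Char) : List Char → Bool
  | [] => false
  | c :: rest =>
    if c = 'S' && (match prev with | none => true | some p => PySem.Chars.isspace p) then
      match rest with
      | d :: _ =>
        if PySem.Chars.isdigit d || PySem.Chars.isIn [d] ['+', '-', '.'] then true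
        else scan_spindle (some c) rest
      | [] => scan_spindle (some c) rest
    else scan_spindle (some c) rest

def has_spindle_s_py_alt (line : String) : Bool :=
  if is_full_line_comment_py line.toList then false
  else
    let code := PySem.Chars.strip (strip_inline_comment_py line.toList)
    scan_spindle none code

-- ===== PRECONDITION & SPEC =====
def Spec_has_spindle_s_py (line : String) (out : Bool) : Prop := out = has_spindle_s_py_alt line
instance (line : String) (out : Bool) : Decidable (Spec_has_spindle_s_py line out) := by unfold Spec_has_spindle_s_py; infer_instance

-- ===== CLAIM (what is proved, stated in full; the proofs are below) =====
def Claim_equal_has_spindle_s_py : Prop := ∀ (line : String), Dom_has_spindle_s_py line → Spec_has_spindle_s_py line (has_spindle_s_py line)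

-- ===== LEMMAS AND PROOFS =====

-- clean form of the per-token second-char test
def okB (d : Char) : Bool := PySem.Chars.isdigit d || d = '+' || d = '-' || d = '.'

-- clean form of A's per-token test: only the first two chars of a token matter
def tokSpec : List Char → Bool
  | a :: b :: _ => (a = 'S') && okB b
  | _ => false

def nextOk : List Char → Bool
  | d :: _ => okB d
  | [] => false

-- clean form of B's scanner (state = "previous char absent or whitespace")
def scanT : Bool → List Char → Bool
  | _, [] => false
  | st, c :: rest => if (c = 'S') && st && nextOk rest then true else scanT (PySem.Chars.isspace c) rest

-- A-side intermediate: token-wise any, expressed along split₀.go's recursion (cur = reversed current token)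
def gA : List Char → List Char → Bool
  | cur, [] => tokSpec cur.reverse
  | cur, c :: rest =>
    if PySem.Chars.isspace c then tokSpec cur.reverse || gA [] rest else gA (c :: cur) rest

lemma isIn_pmd (d : Char) : PySem.Chars.isIn [d] ['+', '-', '.'] = (d = '+' || d = '-' || d = '.') := by
  by_cases h : d ∈ ['+', '-', '.']
  · have h1 : PySem.Chars.isIn [d] ['+', '-', '.'] = true := by
      rw [PySem.Chars.isIn_iff_infix]
      obtain ⟨s, t, hst⟩ := List.append_of_mem h
      exact ⟨s, t, by rw [List.append_assoc]; simpa using hst.symm⟩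
    rw [h1]
    simp only [List.mem_cons, List.not_mem_nil, or_false] at h
    rcases h with h | h | h <;> simp [h]
  · have h1 : PySem.Chars.isIn [d] ['+', '-', '.'] = false := by
      rw [PySem.Chars.isIn_eq_false_iff]
      intro hinf
      exact h (List.singleton_sublist.mp hinf.sublist)
    rw [h1]
    simp only [List.mem_cons, List.not_mem_nil, or_false, not_or] at h
    simp [h.1, h.2.1, h.2.2]

lemma tok_eq (t : List Char) : tok_has_s_py t = tokSpec t := by
  match t with
  | [] => rfl
  | [a] => simp [tok_has_s_py, tokSpec]
  | a :: b :: r =>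
    simp only [tok_has_s_py, tokSpec, PySem.Chars.startswith, List.isPrefixOf, List.length_cons,
      isIn_pmd, okB]
    by_cases ha : a = 'S'
    · simp only [ha, beq_self_eq_true, Bool.true_and, decide_true]
      have h1 : (1 : Nat) < r.length + 1 + 1 := by omega
      simp only [h1, decide_true, if_true]
      have hget : PySem.List.pyGet? (('S' : Char) :: b :: r) (1 : Int) = some b := by
        simp [PySem.List.pyGet?, PySem.List.pyIdx?]
      rw [hget]
      simp [Bool.or_assoc]
    · have : ('S' == a) = false := by simp [beq_iff_eq]; exact fun h => ha h.symm
      simp [this, ha]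

-- whitespace characters are never digits or '+', '-', '.'
lemma okB_of_space (d : Char) (h : PySem.Chars.isspace d = true) : okB d = false := by
  by_cases h1 : d = '+'
  · subst h1; exact absurd h (by decide)
  by_cases h2 : d = '-'
  · subst h2; exact absurd h (by decide)
  by_cases h3 : d = '.'
  · subst h3; exact absurd h (by decide)
  rcases Bool.eq_false_or_eq_true (PySem.Chars.isdigit d) with hd | hd
  · exfalso
    have hdd : 48 ≤ d.toNat ∧ d.toNat ≤ 57 := by
      simp only [PySem.Chars.isdigit, Bool.and_eq_true, decide_eq_true_eq, Char.le_def,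
        UInt32.le_iff_toNat_le] at hd
      exact hd
    simp only [PySem.Chars.isspace, Bool.or_eq_true, Bool.and_eq_true, decide_eq_true_eq] at h
    omega
  · simp [okB, h1, h2, h3, hd]

-- split₀.go's any equals gA
lemma go_any (s : List Char) : ∀ cur acc,
    (PySem.Chars.split₀.go s cur acc).any tokSpec = (acc.any tokSpec || gA cur s) := by
  induction s with
  | nil =>
    intro cur acc
    rw [PySem.Chars.split₀.go]
    cases cur with
    | nil => simp [gA, tokSpec]
    | cons c cs => simp [gA, Bool.or_comm]
  | cons c rest ih =>
    intro cur acc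
    rw [PySem.Chars.split₀.go]
    by_cases hs : PySem.Chars.isspace c
    · cases cur with
      | nil => simp [hs, gA, ih, tokSpec]
      | cons x xs =>
        simp only [hs, if_true, List.isEmpty_cons, Bool.false_eq_true, if_false, ih, gA,
          List.any_cons]
        cases tokSpec (x :: xs).reverse <;> simp
    · simp [hs, gA, ih]

-- B's scanner only depends on whether prev is absent-or-whitespace
lemma scan_eq_scanT (s : List Char) : ∀ prev,
    scan_spindle prev s = scanT (match prev with | none => true | some p => PySem.Chars.isspace p) s := by
  induction s with
  | nil => intro prev; rfl
  | cons c rest ih =>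
    intro prev
    rw [scan_spindle.eq_def, scanT]
    cases rest with
    | nil => simp [ih, nextOk]
    | cons d r =>
      simp only [isIn_pmd, nextOk, okB, ih (some c)]
      by_cases h : ((c = 'S' : Bool) && (match prev with | none => true | some p => PySem.Chars.isspace p)) = true
      · rw [if_pos h]
        by_cases h2 : (PySem.Chars.isdigit d || (d = '+' || d = '-' || d = '.') : Bool) = true
        · rw [if_pos h2, if_pos (by simp only [Bool.or_assoc] at h2 ⊢; simp [h, h2])]
        · rw [if_neg h2, if_neg (by simp only [Bool.not_eq_true, Bool.or_assoc] at h2 ⊢; simp [h2])]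
      · rw [if_neg h, if_neg (by simp only [Bool.not_eq_true] at h ⊢; simp [Bool.and_assoc] at *; intro h1 h2; exact absurd (h h1) (by simp [h2]))]

-- the two traversals agree
lemma gA_eq_scanT (s : List Char) :
    (gA [] s = scanT true s) ∧
    (∀ cur, cur ≠ [] →
      gA cur s = (tokSpec (cur.reverse ++ s.takeWhile (fun c => !PySem.Chars.isspace c)) || scanT false s)) := by
  induction s with
  | nil =>
    refine ⟨rfl, fun cur hc => ?_⟩
    simp [gA, scanT]
  | cons c rest ih =>
    constructor
    · by_cases hs : PySem.Chars.isspace c = true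
      · have hcS : (c = 'S' : Bool) = false := by
          simp only [decide_eq_false_iff_not]
          intro hc; subst hc; exact absurd hs (by decide)
        rw [gA, scanT, if_pos hs, hcS]
        simp [ih.1, tokSpec, hs]
      · rw [gA, scanT, if_neg hs]
        rw [ih.2 [c] (by simp)]
        simp only [List.reverse_singleton, List.singleton_append, hs]
        have hts : tokSpec (c :: rest.takeWhile (fun x => !PySem.Chars.isspace x)) = ((c = 'S') && nextOk rest) := by
          cases rest with
          | nil => simp [tokSpec, nextOk]
          | cons d r =>
            by_cases hd : PySem.Chars.isspace d = true
            · rw [List.takeWhile_cons_of_neg (by simp [hd])]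
              simp [tokSpec, nextOk, okB_of_space d hd]
            · rw [List.takeWhile_cons_of_pos (by simp [hd])]
              simp [tokSpec, nextOk]
        rw [hts]
        by_cases hcond : ((c = 'S' : Bool) && nextOk rest) = true
        · simp [hcond]
        · simp only [Bool.not_eq_true] at hcond
          simp [hcond]
    · intro cur hc
      by_cases hs : PySem.Chars.isspace c = true
      · have hcS : (c = 'S' : Bool) = false := by
          simp only [decide_eq_false_iff_not]
          intro h; subst h; exact absurd hs (by decide)
        rw [gA, scanT, if_pos hs, hcS]
        rw [List.takeWhile_cons_of_neg (by simp [hs])]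
        simp [ih.1, hs]
      · rw [gA, scanT, if_neg hs]
        rw [ih.2 (c :: cur) (by simp)]
        rw [List.takeWhile_cons_of_pos (by simp [hs])]
        have hsf : PySem.Chars.isspace c = false := by simpa using hs
        simp only [List.reverse_cons, List.append_assoc, List.singleton_append, hsf]
        have : ((c = 'S' : Bool) && false && nextOk rest) = false := by simp
        rw [this]
        simp

lemma main_eq (line : String) : has_spindle_s_py line = has_spindle_s_py_alt line := by
  unfold has_spindle_s_py has_spindle_s_py_alt
  by_cases hg : is_full_line_comment_py line.toList = true
  · simp [hg]
  · simp only [hg, Bool.false_eq_true, if_false]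
    by_cases he : (PySem.Chars.strip (strip_inline_comment_py line.toList)).isEmpty = true
    · rw [if_pos he]
      rw [List.isEmpty_iff.mp he]
      rfl
    · rw [if_neg he]
      rw [show tok_has_s_py = tokSpec from funext tok_eq]
      rw [PySem.Chars.split₀, go_any]
      rw [scan_eq_scanT]
      simp [(gA_eq_scanT _).1]

-- ===== VERDICT (by name: the statement is the Claim_ definition above) =====
theorem has_spindle_s_py_spec : Claim_equal_has_spindle_s_py := by
  intro line _
  unfold Spec_has_spindle_s_py
  exact main_eq line
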